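-- pv_equiv track=rewrite | github.com/arielbakal/AlgoritmosyEstructuradeDatosI_UBA_FCEN | CMS/filasParecidas.py | filasParecidas
-- ===== SOURCE A (Python) =====
-- from typing import List
--
-- def filasParecidas(matriz: List[List[int]]) -> bool :
--   res: bool = False
--   fila: List[int] = []
--   fila2: List[int] = []
--
--   if len(matriz) == 1:
--     return res
--
--   elif len(matriz) > 1:
--
--     for s in range(0, len(matriz)): # Recorro filas
--
--         for r in range(0, len(matriz[0])): # Recorro la fila s y la guardo
--             fila.append(matriz[s][r])
--
--         for i in range(0, len(matriz)): # Recorro las filas != s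
--             if i != s:
--                 for j in range(0, len(matriz[0])):
--                     fila2.append(matriz[i][j])
--             if fila == fila2: # Comparo fila s con fila != s
--                 res = True
--                 return res
--             else:
--                 fila2.clear()
--
--         fila.clear()
--
--   return res
-- ===== SOURCE B (Python) =====
-- def filasParecidas(matriz):
--     k = len(matriz[0]) if matriz else 0
--     filas = sorted(tuple(f[:k]) for f in matriz)
--     for prev, cur in zip(filas, filas[1:]):
--         if prev == cur:
--             return True
--     return False
-- ===== Notes on version B (the rewrite author's own statement) =====
-- stated objective: faster
-- what changed: Replaced A's all-pairs row copying-and-comparing nested loops by truncating each row once to the first row's length, sorting the rows, and scanning once for an equal adjacent pair.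
-- outside the precondition, e.g. on filasParecidas([[1], [1], []]): A returns True, B returns True
import Mathlib
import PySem

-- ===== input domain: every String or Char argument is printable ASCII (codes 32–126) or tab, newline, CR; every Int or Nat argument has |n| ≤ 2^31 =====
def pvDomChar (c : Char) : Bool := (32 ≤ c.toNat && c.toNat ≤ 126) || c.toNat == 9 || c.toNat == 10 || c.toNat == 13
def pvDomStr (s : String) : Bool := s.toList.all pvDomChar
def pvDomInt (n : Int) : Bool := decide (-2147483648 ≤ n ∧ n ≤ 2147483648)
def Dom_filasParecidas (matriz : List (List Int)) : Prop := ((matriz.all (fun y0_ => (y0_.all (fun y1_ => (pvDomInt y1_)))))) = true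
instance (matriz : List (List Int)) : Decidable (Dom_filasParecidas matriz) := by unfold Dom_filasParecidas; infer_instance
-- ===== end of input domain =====

-- B replaces A's all-pairs row copy-and-compare loops by one sort of the rows (truncated, as A
-- compares them, to the first row's length) plus a single adjacent-pair scan (objective: faster,
-- measured).

-- ===== PORT A =====
-- the 'for r in range(0, len(matriz[0])): fila.append(matriz[s][r])' copy loop (also the j loop);
-- pyGetD totalises the indexing that raises IndexError in Python on rows shorter than the first
-- (those inputs are outside Pre_)
def pvFilaCopy (matriz : List (List Int)) (s : Int) : List Int :=
  let row := (PySem.List.pyGet? matriz s).getD []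
  (PySem.List.pyRange 0 ((matriz.headD []).length : Int) 1).foldl
    (fun fila r => fila ++ [PySem.List.pyGetD row r 0]) []

-- the 'for i in range(0, len(matriz))' loop with its fila2 accumulator and early return
def pvLoopI (matriz : List (List Int)) (fila : List Int) (s : Int) :
    List Int → List Int → Bool
  | [], _ => false
  | i :: rest, fila2 =>
    let fila2' := if i ≠ s then fila2 ++ pvFilaCopy matriz i else fila2
    if fila = fila2' then true else pvLoopI matriz fila s rest []

-- the 'for s in range(0, len(matriz))' loop
def pvLoopS (matriz : List (List Int)) : List Int → Bool
  | [] => false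
  | s :: rest =>
    let fila := pvFilaCopy matriz s
    if pvLoopI matriz fila s (PySem.List.pyRange 0 (matriz.length : Int) 1) [] then true
    else pvLoopS matriz rest

def filasParecidas (matriz : List (List Int)) : Bool :=
  if matriz.length = 1 then false
  else if 1 < matriz.length then
    pvLoopS matriz (PySem.List.pyRange 0 (matriz.length : Int) 1)
  else false

-- ===== PORT B =====
-- the 'for prev, cur in zip(filas, filas[1:])' adjacent scan with early return
def pvAdjScan : List (List Int) → Bool
  | a :: b :: rest => if a = b then true else pvAdjScan (b :: rest)
  | _ => false

def filasParecidas_alt (matriz : List (List Int)) : Bool :=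
  let k : Int := ((matriz.headD []).length : Int)
  pvAdjScan (PySem.List.sorted (matriz.map (fun f => PySem.List.slice f none (some k)))
    (fun x => x))

-- ===== PRECONDITION & SPEC =====
-- Pre_ excludes matrices with a row shorter than the first: A's copy loops run to len(matriz[0])
-- and raise IndexError on such a row, except when A happens to find a duplicate before reaching
-- it and returns True early (and there B returns True as well).
def Pre_filasParecidas (matriz : List (List Int)) : Prop :=
  ∀ row ∈ matriz, (matriz.headD []).length ≤ row.length
instance (matriz : List (List Int)) : Decidable (Pre_filasParecidas matriz) := by
  unfold Pre_filasParecidas; infer_instance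

def pvWitness_filasParecidas : List (List Int) := [[1, 2], [3, 4], [1, 2]]

def Spec_filasParecidas (matriz : List (List Int)) (out : Bool) : Prop := out = filasParecidas_alt matriz
instance (matriz : List (List Int)) (out : Bool) : Decidable (Spec_filasParecidas matriz out) := by unfold Spec_filasParecidas; infer_instance

-- ===== CLAIM (what is proved, stated in full; the proofs are below) =====
def Claim_equal_filasParecidas : Prop := ∀ (matriz : List (List Int)), Dom_filasParecidas matriz → Pre_filasParecidas matriz → Spec_filasParecidas matriz (filasParecidas matriz)

-- ===== LEMMAS AND PROOFS =====

-- the rows as A compares them: truncated to the first row's length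
def pvTrunc (matriz : List (List Int)) : List (List Int) :=
  matriz.map (fun row => row.take (matriz.headD []).length)

theorem pvMapRange (row : List Int) (m : Nat) (hm : m ≤ row.length) :
    (PySem.List.pyRange 0 (m : Int) 1).map (fun r => PySem.List.pyGetD row r 0) = row.take m := by
  rw [PySem.List.pyRange_one, List.map_map]
  apply List.ext_getElem
  · simpa using Nat.min_eq_left hm
  · intro i h1 h2
    simp only [List.getElem_map, List.getElem_range, Function.comp]
    have hc : ((0 : Int) + (i : Int)) = ((i : Nat) : Int) := by omega
    have hi : i < row.length := by
      simp at h1; omega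
    rw [hc, PySem.List.pyGetD_natCast, List.getElem_take, List.getD_eq_getElem row 0 hi]

-- Under Pre_, the copy loop rebuilds exactly row k truncated to the first row's length.
theorem pvFilaCopy_eq (matriz : List (List Int)) (hP : Pre_filasParecidas matriz)
    (k : Nat) (hk : k < matriz.length) :
    pvFilaCopy matriz (k : Int) = (pvTrunc matriz)[k]'(by simpa [pvTrunc] using hk) := by
  unfold pvFilaCopy
  rw [PySem.List.pyGet?_natCast, List.getElem?_eq_getElem hk]
  simp only [Option.getD_some]
  rw [PySem.List.foldl_append_singleton_eq_map (fun r => PySem.List.pyGetD matriz[k] r 0)]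
  rw [List.nil_append, pvMapRange matriz[k] _ (hP matriz[k] (List.getElem_mem hk))]
  simp [pvTrunc]

theorem pvLoopI_spec (matriz : List (List Int)) (fila : List Int) (s : Int)
    (is : List Int) :
    pvLoopI matriz fila s is [] = true ↔
      ∃ i ∈ is, fila = (if i ≠ s then pvFilaCopy matriz i else []) := by
  induction is with
  | nil => simp [pvLoopI]
  | cons i rest ih =>
    simp only [pvLoopI]
    by_cases h : fila = (if i ≠ s then [] ++ pvFilaCopy matriz i else [])
    · simp only [if_pos h]
      constructor
      · intro _; exact ⟨i, List.mem_cons_self .., by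
          rcases Decidable.em (i ≠ s) with hne | hne <;> simp [hne] at h ⊢ <;> exact h⟩
      · intro _; trivial
    · rw [if_neg h, ih]
      constructor
      · rintro ⟨j, hj, hfe⟩; exact ⟨j, List.mem_cons_of_mem _ hj, hfe⟩
      · rintro ⟨j, hj, hfe⟩
        rcases List.mem_cons.mp hj with rfl | hj'
        · exfalso; apply h
          rcases Decidable.em (j ≠ s) with hne | hne <;> simp [hne] at hfe ⊢ <;> exact hfe
        · exact ⟨j, hj', hfe⟩

theorem pvLoopS_spec (matriz : List (List Int)) (ss : List Int) :
    pvLoopS matriz ss = true ↔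
      ∃ s ∈ ss, pvLoopI matriz (pvFilaCopy matriz s) s
        (PySem.List.pyRange 0 (matriz.length : Int) 1) [] = true := by
  induction ss with
  | nil => simp [pvLoopS]
  | cons s rest ih =>
    simp only [pvLoopS]
    split_ifs with h
    · simp only [true_iff]; exact ⟨s, List.mem_cons_self .., h⟩
    · rw [ih]
      constructor
      · rintro ⟨t, ht, hl⟩; exact ⟨t, List.mem_cons_of_mem _ ht, hl⟩
      · rintro ⟨t, ht, hl⟩
        rcases List.mem_cons.mp ht with rfl | ht'
        · exact absurd hl (by simpa using h)
        · exact ⟨t, ht', hl⟩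

-- duplicates as two distinct positions
def pvHasDup (l : List (List Int)) : Prop :=
  ∃ (p q : Nat) (_ : p < l.length) (_ : q < l.length), p ≠ q ∧ l[p]! = l[q]!

theorem pvHasDup_iff_not_nodup (l : List (List Int)) :
    pvHasDup l ↔ ¬ l.Nodup := by
  rw [List.Nodup, List.pairwise_iff_getElem]
  constructor
  · rintro ⟨p, q, hp, hq, hne, he⟩ hall
    rcases Nat.lt_or_ge p q with hlt | hge
    · exact hall p q hp hq hlt (by
        rw [getElem!_pos l p hp, getElem!_pos l q hq] at he; exact he)
    · have hlt : q < p := lt_of_le_of_ne hge (fun h => hne h.symm)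
      exact hall q p hq hp hlt (by
        rw [getElem!_pos l p hp, getElem!_pos l q hq] at he; exact he.symm)
  · intro hnd
    have h' : ∃ p q, p < q ∧ ∃ (_ : p < l.length) (_ : q < l.length),
        l[p] = l[q] := by simpa using hnd
    rcases h' with ⟨p, q, hlt, hp, hq, he⟩
    exact ⟨p, q, hp, hq, Nat.ne_of_lt hlt, by
      rw [getElem!_pos l p hp, getElem!_pos l q hq]
      exact he⟩

-- A detects exactly a duplicate among the truncated rows.
theorem filasParecidas_eq_dup (matriz : List (List Int)) (hP : Pre_filasParecidas matriz) :
    filasParecidas matriz = true ↔ pvHasDup (pvTrunc matriz) := by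
  have hTlen : (pvTrunc matriz).length = matriz.length := by simp [pvTrunc]
  unfold filasParecidas
  split_ifs with h1 h2
  · -- exactly one row: no duplicate
    simp only [false_iff]
    rintro ⟨p, q, hp, hq, hne, -⟩
    omega
  · rw [pvLoopS_spec]
    constructor
    · rintro ⟨s, hs, hl⟩
      rw [pvLoopI_spec] at hl
      rcases hl with ⟨i, hi, he⟩
      rw [PySem.List.mem_pyRange_one] at hs hi
      obtain ⟨hs0, hsn⟩ := hs
      obtain ⟨hi0, hin⟩ := hi
      have hsk : s = ((s.toNat : Nat) : Int) := (Int.toNat_of_nonneg hs0).symm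
      have hik : i = ((i.toNat : Nat) : Int) := (Int.toNat_of_nonneg hi0).symm
      have hsl : s.toNat < matriz.length := by omega
      have hil : i.toNat < matriz.length := by omega
      by_cases hne : i ≠ s
      · rw [if_pos hne] at he
        rw [hsk, pvFilaCopy_eq matriz hP s.toNat hsl] at he
        rw [hik, pvFilaCopy_eq matriz hP i.toNat hil] at he
        refine ⟨s.toNat, i.toNat, by omega, by omega, fun hc => hne (by omega), ?_⟩
        rw [getElem!_pos _ s.toNat (by omega), getElem!_pos _ i.toNat (by omega)]
        exact he
      · -- i = s and fila = []: the first row's length is 0, so all truncated rows are []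
        rw [if_neg hne] at he
        rw [hsk, pvFilaCopy_eq matriz hP s.toNat hsl] at he
        have h0 : (matriz.headD []).length = 0 := by
          have htk : matriz[s.toNat].take (matriz.headD []).length = [] := by
            simpa [pvTrunc] using he
          have hle := hP matriz[s.toNat] (List.getElem_mem hsl)
          rcases List.take_eq_nil_iff.mp htk with h | h
          · exact h
          · rw [h] at hle; simpa using hle
        have hall : ∀ (j : Nat) (hj : j < matriz.length),
            (pvTrunc matriz)[j]'(by omega) = [] := by
          intro j hj
          simp only [pvTrunc, List.getElem_map]
          exact List.take_eq_nil_iff.mpr (Or.inl h0)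
        refine ⟨0, 1, by omega, by omega, by omega, ?_⟩
        rw [getElem!_pos _ 0 (by omega), getElem!_pos _ 1 (by omega),
            hall 0 (by omega), hall 1 (by omega)]
    · rintro ⟨p, q, hp, hq, hne, he⟩
      rw [getElem!_pos _ p hp, getElem!_pos _ q hq] at he
      have hp' : p < matriz.length := by omega
      have hq' : q < matriz.length := by omega
      refine ⟨(p : Int), by rw [PySem.List.mem_pyRange_one]; omega, ?_⟩
      rw [pvLoopI_spec]
      refine ⟨(q : Int), by rw [PySem.List.mem_pyRange_one]; omega, ?_⟩
      have hqp : ((q : Int) ≠ (p : Int)) := by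
        intro hc; exact hne (by omega)
      rw [if_pos hqp, pvFilaCopy_eq matriz hP p hp', pvFilaCopy_eq matriz hP q hq']
      exact he
  · -- empty matrix
    simp only [false_iff]
    rintro ⟨p, q, hp, -⟩
    rw [hTlen] at hp
    omega

-- On a ≤-sorted list the adjacent scan detects exactly non-Nodup.
theorem pvAdjScan_spec (l : List (List Int)) (hs : l.Pairwise (· ≤ ·)) :
    pvAdjScan l = true ↔ ¬ l.Nodup := by
  induction l with
  | nil => simp [pvAdjScan]
  | cons a t ih =>
    cases t with
    | nil => simp [pvAdjScan]
    | cons b t' =>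
      rw [List.pairwise_cons] at hs
      obtain ⟨hab, hrest⟩ := hs
      by_cases hEq : a = b
      · subst hEq
        simp [pvAdjScan, List.nodup_cons]
      · simp only [pvAdjScan, if_neg hEq]
        rw [ih hrest]
        have hnm : a ∉ b :: t' := by
          intro hmem
          rcases List.mem_cons.mp hmem with rfl | hmem'
          · exact hEq rfl
          · have h1 : a ≤ b := hab b (List.mem_cons_self ..)
            have h2 : b ≤ a := (List.pairwise_cons.mp hrest).1 a hmem'
            exact hEq (le_antisymm h1 h2)
        constructor
        · intro hnd hc
          exact hnd (List.nodup_cons.mp hc).2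
        · intro hnd hc
          exact hnd (List.nodup_cons.mpr ⟨hnm, hc⟩)

-- B's truncated rows are exactly pvTrunc.
theorem pvSliceTrunc (matriz : List (List Int)) :
    matriz.map (fun f => PySem.List.slice f none (some ((matriz.headD []).length : Int)))
      = pvTrunc matriz := by
  unfold pvTrunc
  apply List.map_congr_left
  intro f _
  exact PySem.List.slice_to_natCast f _

theorem filasParecidas_alt_eq_dup (matriz : List (List Int)) :
    filasParecidas_alt matriz = true ↔ pvHasDup (pvTrunc matriz) := by
  -- the two DecidableLT instances on List Int are propositionally equal (Decidable is a subsingleton)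
  have hsorted : PySem.List.sorted (pvTrunc matriz) (fun x => x) =
      @PySem.List.sorted (List Int) (List Int) _
        (@LinearOrder.toDecidableLT (List Int) List.instLinearOrder) (pvTrunc matriz)
        (fun x => x) false := by
    rw [show (fun a b : List Int => a.decidableLT b) =
        @LinearOrder.toDecidableLT (List Int) List.instLinearOrder from
      funext fun a => funext fun b => Subsingleton.elim _ _]
  show pvAdjScan (PySem.List.sorted
      (matriz.map (fun f => PySem.List.slice f none (some ((matriz.headD []).length : Int))))
      (fun x => x)) = true ↔ pvHasDup (pvTrunc matriz)
  rw [pvSliceTrunc matriz, hsorted,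
      pvAdjScan_spec _ (PySem.List.sorted_pairwise (pvTrunc matriz) (fun x => x)),
      pvHasDup_iff_not_nodup]
  have hperm := (PySem.List.sorted_perm (pvTrunc matriz) (fun x => x) false).nodup_iff
  rw [hsorted] at hperm
  constructor
  · intro h hc; exact h (hperm.mpr hc)
  · intro h hc; exact h (hperm.mp hc)

-- ===== VERDICT (by name: the statement is the Claim_ definition above) =====
theorem filasParecidas_spec : Claim_equal_filasParecidas := by
  intro matriz _ hP
  unfold Spec_filasParecidas
  rw [Bool.eq_iff_iff, filasParecidas_eq_dup matriz hP, filasParecidas_alt_eq_dup matriz]
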